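-- pv_equiv track=rewrite | github.com/miliar/Code_Jam_Webscraper | solutions_python/Problem_181/1697.py | solve
-- ===== SOURCE A (Python) =====
-- from collections import deque
--
-- def solve(S):
--     r = deque()
--     for c in S:
--         if r:
--             if c < r[0]:
--                 r.append(c)
--             else:
--                 r.appendleft(c)
--         else:
--             r.append(c)
--     return ''.join(r)
-- ===== SOURCE B (Python) =====
-- def solve(S):
--     # Divide and conquer: a character is kept on the "record" side iff it is >= every
--     # character before it.  go(cs, lo) processes a nonempty segment given lo = the
--     # maximum character strictly before the segment (None if there is none), and
--     # returns (records, others, new maximum).  Halving the segment and threading the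
--     # maximum through gives the same classification as the sequential scan.
--     def go(cs, lo):
--         if len(cs) == 1:
--             c = cs[0]
--             hi = c if lo is None or c > lo else lo
--             if lo is None or c >= lo:
--                 return ([c], [], hi)
--             return ([], [c], hi)
--         m = len(cs) // 2
--         r1, o1, h1 = go(cs[:m], lo)
--         r2, o2, h2 = go(cs[m:], h1)
--         return (r1 + r2, o1 + o2, h2)
--     if not S:
--         return ''
--     r, o, _ = go(list(S), None)
--     return ''.join(reversed(r)) + ''.join(o)
-- ===== Notes on version B (the rewrite author's own statement) =====
-- stated objective: alternative
-- what changed: Replaces the sequential deque scan by a divide-and-conquer: the string is split in halves, each half classifies its characters into records/others given the maximum threaded in from the left half, and the pieces are concatenated (reversed records first).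
import Mathlib
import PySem

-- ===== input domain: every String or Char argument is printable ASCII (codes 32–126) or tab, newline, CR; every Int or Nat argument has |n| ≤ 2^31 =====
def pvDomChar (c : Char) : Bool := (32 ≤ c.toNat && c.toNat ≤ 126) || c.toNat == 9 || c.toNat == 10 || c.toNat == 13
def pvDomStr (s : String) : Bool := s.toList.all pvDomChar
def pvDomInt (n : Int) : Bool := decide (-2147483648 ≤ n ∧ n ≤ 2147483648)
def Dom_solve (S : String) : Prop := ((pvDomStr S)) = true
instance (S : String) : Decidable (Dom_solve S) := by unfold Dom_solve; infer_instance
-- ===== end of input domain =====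

-- B replaces A's sequential deque scan by divide-and-conquer: halve the segment and
-- thread the running maximum from the left half into the right; same result, different structure.


-- ===== PORT A =====
-- deque as a front-first List Char: r[0] is head, append = ++ [c], appendleft = cons
def solveStepA (r : List Char) (c : Char) : List Char :=
  match r with
  | [] => [c]
  | x :: _ => if c < x then r ++ [c] else c :: r

def solve (S : String) : String :=
  String.mk (S.toList.foldl solveStepA [])

-- ===== PORT B =====
-- go(cs, lo): divide-and-conquer classification of a nonempty segment, lo = max char
-- before the segment (none if there is none); returns (records, others, new max).
-- The [] case is a totality guard only; B never calls go on an empty segment.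
def goB (cs : List Char) (lo : Option Char) : List Char × List Char × Option Char :=
  match cs with
  | [] => ([], [], lo)
  | [c] =>
      let hi : Char := match lo with | none => c | some l => if l < c then c else l
      if lo.elim true (fun l => l ≤ c) then ([c], [], some hi) else ([], [c], some hi)
  | c1 :: c2 :: rest =>
      let cs' := c1 :: c2 :: rest
      let m := cs'.length / 2
      let p1 := goB (cs'.take m) lo
      let p2 := goB (cs'.drop m) p1.2.2
      (p1.1 ++ p2.1, p1.2.1 ++ p2.2.1, p2.2.2)
termination_by cs.length
decreasing_by
  · simp [List.length_take]; omega
  · simp; omega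

def solve_alt (S : String) : String :=
  if S.toList.isEmpty then ""
  else
    let p := goB S.toList none
    String.mk (p.1.reverse ++ p.2.1)

-- ===== PRECONDITION & SPEC =====
def Spec_solve (S : String) (out : String) : Prop := out = solve_alt S
instance (S : String) (out : String) : Decidable (Spec_solve S out) := by unfold Spec_solve; infer_instance

-- ===== CLAIM (what is proved, stated in full; the proofs are below) =====
def Claim_equal_solve : Prop := ∀ (S : String), Dom_solve S → Spec_solve S (solve S)

-- ===== LEMMAS AND PROOFS =====

-- sequential step equal to goB's leaf behaviour, used only to reason about goB
def solveStepB (st : List Char × List Char × Option Char) (c : Char) :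
    List Char × List Char × Option Char :=
  let (r, o, lo) := st
  let hi : Char := match lo with | none => c | some l => if l < c then c else l
  if lo.elim true (fun l => l ≤ c) then (r ++ [c], o, some hi) else (r, o ++ [c], some hi)

theorem foldl_stepB_shift (cs : List Char) (r o : List Char) (lo : Option Char) :
    cs.foldl solveStepB (r, o, lo) =
      (r ++ (cs.foldl solveStepB ([], [], lo)).1,
       o ++ (cs.foldl solveStepB ([], [], lo)).2.1,
       (cs.foldl solveStepB ([], [], lo)).2.2) := by
  induction cs generalizing r o lo with
  | nil => simp
  | cons c cs ih =>
    simp only [List.foldl_cons, solveStepB]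
    split_ifs with h
    · rw [ih (r ++ [c]) o]
      simp only [List.nil_append]
      rw [ih [c] []]
      simp
    · rw [ih r (o ++ [c])]
      simp only [List.nil_append]
      rw [ih [] [c]]
      simp

theorem goB_eq_foldl (cs : List Char) (lo : Option Char) :
    goB cs lo = cs.foldl solveStepB ([], [], lo) := by
  induction cs, lo using goB.induct with
  | case1 lo => simp [goB]
  | case2 lo c h => rw [goB.eq_def]; simp [solveStepB, h]
  | case3 lo c h => rw [goB.eq_def]; simp [solveStepB, h]
  | case4 lo c1 c2 rest cs' m p1 ih1 ih1' ih2 =>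
    conv_rhs => rw [← List.take_append_drop ((c1::c2::rest).length / 2) (c1::c2::rest)]
    rw [List.foldl_append, ← ih1, foldl_stepB_shift, ← ih2]
    rw [goB]

-- invariant relating A's deque to the sequential state
def solveInv (r : List Char) (st : List Char × List Char × Option Char) : Prop :=
  r = st.1.reverse ++ st.2.1 ∧
    ((st.1 = [] ∧ st.2.1 = [] ∧ st.2.2 = none) ∨
      ∃ m rs, st.1 = rs ++ [m] ∧ st.2.2 = some m)

theorem solveInv_step (r : List Char) (st : List Char × List Char × Option Char)
    (c : Char) (h : solveInv r st) : solveInv (solveStepA r c) (solveStepB st c) := by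
  obtain ⟨recs, oth, lo⟩ := st
  obtain ⟨hr, hcase⟩ := h
  rcases hcase with ⟨h1, h2, h3⟩ | ⟨m, rs, h1, h2⟩
  · simp only at h1 h2 h3; subst h1; subst h2; subst h3
    simp at hr; subst hr
    exact ⟨by simp [solveStepA, solveStepB],
      Or.inr ⟨c, [], by simp [solveStepB], by simp [solveStepB]⟩⟩
  · simp only at h1 h2; subst h1; subst h2
    by_cases hcm : c < m
    · have hnot : ¬ m ≤ c := not_le.mpr hcm
      have hm : ¬ m < c := not_lt.mpr (le_of_lt hcm)
      refine ⟨?_, Or.inr ⟨m, rs, by simp [solveStepB, hnot], by simp [solveStepB, hnot, hm]⟩⟩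
      simp [solveStepA, solveStepB, hr, hcm, hnot]
    · have hle : m ≤ c := not_lt.mp hcm
      have hhi : (if m < c then c else m) = c := by
        by_cases hlt : m < c
        · simp [hlt]
        · simpa [hlt] using le_antisymm hle (not_lt.mp hlt)
      refine ⟨?_, Or.inr ⟨c, rs ++ [m], by simp [solveStepB, hle], by simp [solveStepB, hle, hhi]⟩⟩
      simp [solveStepA, solveStepB, hr, hcm, hle]

theorem solveInv_foldl (cs : List Char) (r : List Char)
    (st : List Char × List Char × Option Char) (h : solveInv r st) :
    solveInv (cs.foldl solveStepA r) (cs.foldl solveStepB st) := by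
  induction cs generalizing r st with
  | nil => exact h
  | cons c cs ih => exact ih _ _ (solveInv_step r st c h)

-- ===== VERDICT (by name: the statement is the Claim_ definition above) =====
theorem solve_spec : Claim_equal_solve := by
  intro S _
  unfold Spec_solve solve solve_alt
  by_cases hS : S.toList.isEmpty
  · rw [List.isEmpty_iff] at hS
    simp [hS]
    rfl
  · simp only [hS, if_neg, Bool.false_eq_true, not_false_iff]
    rw [goB_eq_foldl]
    have h := solveInv_foldl S.toList [] ([], [], none) ⟨by simp, Or.inl ⟨rfl, rfl, rfl⟩⟩
    exact congrArg String.mk h.1
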